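-- pv_equiv track=rewrite | github.com/HOYOUNG98/TrenDuk | service/parser_.py | divide_sequences
-- ===== SOURCE A (Python) =====
-- def divide_sequences(moves: list[str]) -> list[list[str]]:
--     top_left = []
--     top_right = []
--     bottom_left = []
--     bottom_right = []
--
--     # Skip the root node which has general information of game.
--     # Start looking at moves.
--     for idx, move in enumerate(moves):
--
--         x, y = move[2:4][0], move[2:4][1]
--         depth = str(idx+1)
--
--         if x < 'j' and y < 'j':
--             top_left.append(move + depth)
--         elif x < 'j' and y > 'j':
--             bottom_left.append(move + depth)
--         elif x > 'j' and y < 'j':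
--             top_right.append(move + depth)
--         elif x > 'j' and y > 'j':
--             bottom_right.append(move + depth)
--
--     return [top_left, bottom_left, top_right, bottom_right]
-- ===== SOURCE B (Python) =====
-- def divide_sequences(moves: list[str]) -> list[list[str]]:
--     top_left = [m + str(i + 1) for i, m in enumerate(moves) if m[2] < 'j' and m[3] < 'j']
--     bottom_left = [m + str(i + 1) for i, m in enumerate(moves) if m[2] < 'j' and m[3] > 'j']
--     top_right = [m + str(i + 1) for i, m in enumerate(moves) if m[2] > 'j' and m[3] < 'j']
--     bottom_right = [m + str(i + 1) for i, m in enumerate(moves) if m[2] > 'j' and m[3] > 'j']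
--     return [top_left, bottom_left, top_right, bottom_right]
-- ===== Notes on version B (the rewrite author's own statement) =====
-- stated objective: alternative
-- what changed: Replaces A's single classifying loop that branches into four accumulators by four independent filtering list comprehensions over enumerate(moves), one per quadrant.
import Mathlib
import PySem

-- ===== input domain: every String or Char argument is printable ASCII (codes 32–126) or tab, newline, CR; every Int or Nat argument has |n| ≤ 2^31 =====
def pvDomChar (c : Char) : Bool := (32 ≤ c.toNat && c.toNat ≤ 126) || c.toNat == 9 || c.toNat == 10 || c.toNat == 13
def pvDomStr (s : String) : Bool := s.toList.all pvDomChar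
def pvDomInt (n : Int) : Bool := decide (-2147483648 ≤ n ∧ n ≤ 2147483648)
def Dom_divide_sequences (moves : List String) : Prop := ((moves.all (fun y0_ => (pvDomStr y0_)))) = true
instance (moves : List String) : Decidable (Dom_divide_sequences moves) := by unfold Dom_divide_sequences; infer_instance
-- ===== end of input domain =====

-- B replaces A's single classifying loop over four accumulators by four independent
-- filtering comprehensions over enumerate(moves), one per quadrant (objective: alternative).

-- ===== PORT A =====
-- one loop step of A: classify move p.2 (at index p.1) into one of the four accumulators
def pvStepA (acc : List String × List String × List String × List String)
    (p : Int × String) : List String × List String × List String × List String :=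
  let xy := PySem.Str.slice p.2 (some 2) (some 4)
  let x := (PySem.Str.pyGet? xy 0).getD ' '   -- getD unreachable under Pre_ (IndexError in Python)
  let y := (PySem.Str.pyGet? xy 1).getD ' '
  let depth := PySem.Int.toStr (p.1 + 1)
  if x < 'j' ∧ y < 'j' then (acc.1 ++ [String.ofList (p.2.toList ++ depth.toList)], acc.2.1, acc.2.2.1, acc.2.2.2)
  else if x < 'j' ∧ y > 'j' then (acc.1, acc.2.1, acc.2.2.1 ++ [String.ofList (p.2.toList ++ depth.toList)], acc.2.2.2)
  else if x > 'j' ∧ y < 'j' then (acc.1, acc.2.1 ++ [String.ofList (p.2.toList ++ depth.toList)], acc.2.2.1, acc.2.2.2)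
  else if x > 'j' ∧ y > 'j' then (acc.1, acc.2.1, acc.2.2.1, acc.2.2.2 ++ [String.ofList (p.2.toList ++ depth.toList)])
  else acc

def divide_sequences (moves : List String) : List (List String) :=
  let r := (PySem.List.enumerate moves 0).foldl pvStepA ([], [], [], [])
  [r.1, r.2.2.1, r.2.1, r.2.2.2]

-- ===== PORT B =====
-- 'm + str(i+1)' for a pair of enumerate(moves)
def pvTag (p : Int × String) : String :=
  String.ofList (p.2.toList ++ (PySem.Int.toStr (p.1 + 1)).toList)

-- m[2] / m[3] (getD unreachable under Pre_; IndexError in Python)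
def pvC2 (m : String) : Char := (PySem.Str.pyGet? m 2).getD ' '
def pvC3 (m : String) : Char := (PySem.Str.pyGet? m 3).getD ' '

def divide_sequences_alt (moves : List String) : List (List String) :=
  let e := PySem.List.enumerate moves 0
  let top_left := (e.filter (fun p => decide (pvC2 p.2 < 'j') && decide (pvC3 p.2 < 'j'))).map pvTag
  let bottom_left := (e.filter (fun p => decide (pvC2 p.2 < 'j') && decide (pvC3 p.2 > 'j'))).map pvTag
  let top_right := (e.filter (fun p => decide (pvC2 p.2 > 'j') && decide (pvC3 p.2 < 'j'))).map pvTag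
  let bottom_right := (e.filter (fun p => decide (pvC2 p.2 > 'j') && decide (pvC3 p.2 > 'j'))).map pvTag
  [top_left, bottom_left, top_right, bottom_right]

-- ===== PRECONDITION & SPEC =====
-- Pre_ excludes exactly the inputs containing a move shorter than 4 characters,
-- on which both Pythons raise IndexError.
def Pre_divide_sequences (moves : List String) : Prop := ∀ m ∈ moves, 4 ≤ m.toList.length
instance (moves : List String) : Decidable (Pre_divide_sequences moves) := by unfold Pre_divide_sequences; infer_instance
def pvWitness_divide_sequences : List String := [";B[aq]", ";W[pd]"]
def Spec_divide_sequences (moves : List String) (out : List (List String)) : Prop := out = divide_sequences_alt moves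
instance (moves : List String) (out : List (List String)) : Decidable (Spec_divide_sequences moves out) := by unfold Spec_divide_sequences; infer_instance

-- ===== CLAIM (what is proved, stated in full; the proofs are below) =====
def Claim_equal_divide_sequences : Prop := ∀ (moves : List String), Dom_divide_sequences moves → Pre_divide_sequences moves → Spec_divide_sequences moves (divide_sequences moves)

-- ===== LEMMAS AND PROOFS =====

-- under Pre_, A's move[2:4][0] is B's move[2]
theorem pvStepA_x (m : String) (h : 4 ≤ m.toList.length) :
    ((PySem.Str.pyGet? (PySem.Str.slice m (some 2) (some 4)) 0).getD ' ') = pvC2 m := by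
  obtain ⟨a, b, c, d, rest, hm⟩ : ∃ a b c d rest, m.toList = a :: b :: c :: d :: rest := by
    match hl : m.toList with
    | a :: b :: c :: d :: rest => exact ⟨a, b, c, d, rest, rfl⟩
    | [] | [_] | [_, _] | [_, _, _] => simp [hl] at h
  have h2 : (2:Int) ≤ (rest.length:Int) + 1 + 1 + 1 := by omega
  simp [pvC2, PySem.Str.pyGet?, PySem.Str.slice, hm, PySem.Chars.pyGet?_eq_listPyGet?,
    PySem.Chars.slice_eq_listSlice, PySem.List.pyGet?, PySem.List.pyIdx?, PySem.List.slice,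
    PySem.List.clampIdx, h2]

theorem pvStepA_y (m : String) (h : 4 ≤ m.toList.length) :
    ((PySem.Str.pyGet? (PySem.Str.slice m (some 2) (some 4)) 1).getD ' ') = pvC3 m := by
  obtain ⟨a, b, c, d, rest, hm⟩ : ∃ a b c d rest, m.toList = a :: b :: c :: d :: rest := by
    match hl : m.toList with
    | a :: b :: c :: d :: rest => exact ⟨a, b, c, d, rest, rfl⟩
    | [] | [_] | [_, _] | [_, _, _] => simp [hl] at h
  have h3 : (3:Int) ≤ (rest.length:Int) + 1 + 1 + 1 := by omega
  simp [pvC3, PySem.Str.pyGet?, PySem.Str.slice, hm, PySem.Chars.pyGet?_eq_listPyGet?,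
    PySem.Chars.slice_eq_listSlice, PySem.List.pyGet?, PySem.List.pyIdx?, PySem.List.slice,
    PySem.List.clampIdx, h3]

-- loop invariant: A's fold appends exactly B's four filtered/mapped lists
theorem pvLoop (l : List (Int × String)) (h : ∀ p ∈ l, 4 ≤ p.2.toList.length)
    (tl tr bl br : List String) :
    l.foldl pvStepA (tl, tr, bl, br) =
      (tl ++ (l.filter (fun p => decide (pvC2 p.2 < 'j') && decide (pvC3 p.2 < 'j'))).map pvTag,
       tr ++ (l.filter (fun p => decide (pvC2 p.2 > 'j') && decide (pvC3 p.2 < 'j'))).map pvTag,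
       bl ++ (l.filter (fun p => decide (pvC2 p.2 < 'j') && decide (pvC3 p.2 > 'j'))).map pvTag,
       br ++ (l.filter (fun p => decide (pvC2 p.2 > 'j') && decide (pvC3 p.2 > 'j'))).map pvTag) := by
  induction l generalizing tl tr bl br with
  | nil => simp
  | cons p l ih =>
    have hp : 4 ≤ p.2.toList.length := h p (by simp)
    have hstep : pvStepA (tl, tr, bl, br) p =
        (if pvC2 p.2 < 'j' ∧ pvC3 p.2 < 'j' then (tl ++ [pvTag p], tr, bl, br)
         else if pvC2 p.2 < 'j' ∧ pvC3 p.2 > 'j' then (tl, tr, bl ++ [pvTag p], br)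
         else if pvC2 p.2 > 'j' ∧ pvC3 p.2 < 'j' then (tl, tr ++ [pvTag p], bl, br)
         else if pvC2 p.2 > 'j' ∧ pvC3 p.2 > 'j' then (tl, tr, bl, br ++ [pvTag p])
         else (tl, tr, bl, br)) := by
      simp only [pvStepA, pvStepA_x p.2 hp, pvStepA_y p.2 hp, pvTag]
    have htail : ∀ q ∈ l, 4 ≤ q.2.toList.length := fun q hq => h q (by simp [hq])
    rcases lt_trichotomy (pvC2 p.2) 'j' with h2 | h2 | h2 <;>
      rcases lt_trichotomy (pvC3 p.2) 'j' with h3 | h3 | h3 <;>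
      simp [List.foldl_cons, hstep, ih htail, h2, h3, not_lt_of_gt]

theorem divide_sequences_spec' (moves : List String)
    (hpre : Pre_divide_sequences moves) :
    divide_sequences moves = divide_sequences_alt moves := by
  have h : ∀ p ∈ PySem.List.enumerate moves 0, 4 ≤ p.2.toList.length := by
    intro p hp
    rcases (PySem.List.mem_enumerate_iff _ _ _).1 hp with ⟨k, hk, rfl⟩
    exact hpre _ (by simp)
  simp [divide_sequences, divide_sequences_alt, pvLoop _ h]

-- ===== VERDICT (by name: the statement is the Claim_ definition above) =====
theorem divide_sequences_spec : Claim_equal_divide_sequences := by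
  intro moves _ hpre
  exact divide_sequences_spec' moves hpre
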